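-- pv_equiv track=rewrite | github.com/prajjwalbajpai/LAPACK-deps | deps_finder.py | collect_subgraph
-- ===== SOURCE A (Python) =====
-- def collect_subgraph(start, graph):
--     visited = set()
--     edges = []
--
--     def dfs(node):
--         if node in visited:
--             return
--         visited.add(node)
--         for child in graph.get(node, []):
--             edges.append((node, child))
--             dfs(child)
--
--     dfs(start)
--     return visited, edges
-- ===== SOURCE B (Python) =====
-- def collect_subgraph(start, graph):
--     visited = {start}
--     edges = []
--     stack = [(start, list(graph.get(start, [])))]
--     while stack:
--         node, children = stack[-1]
--         if not children:
--             stack.pop()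
--             continue
--         child = children[0]
--         stack[-1] = (node, children[1:])
--         edges.append((node, child))
--         if child not in visited:
--             visited.add(child)
--             stack.append((child, list(graph.get(child, []))))
--     return visited, edges
-- ===== Notes on version B (the rewrite author's own statement) =====
-- stated objective: alternative
-- what changed: The recursive DFS (nested function mutating enclosing visited/edges) is replaced by an iterative DFS driven by an explicit stack of (node, remaining-children) frames, appending each edge before the visited check so the pre-order edge sequence, including edges to already-visited children, is identical; B also avoids Python's recursion limit.
import Mathlib
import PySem

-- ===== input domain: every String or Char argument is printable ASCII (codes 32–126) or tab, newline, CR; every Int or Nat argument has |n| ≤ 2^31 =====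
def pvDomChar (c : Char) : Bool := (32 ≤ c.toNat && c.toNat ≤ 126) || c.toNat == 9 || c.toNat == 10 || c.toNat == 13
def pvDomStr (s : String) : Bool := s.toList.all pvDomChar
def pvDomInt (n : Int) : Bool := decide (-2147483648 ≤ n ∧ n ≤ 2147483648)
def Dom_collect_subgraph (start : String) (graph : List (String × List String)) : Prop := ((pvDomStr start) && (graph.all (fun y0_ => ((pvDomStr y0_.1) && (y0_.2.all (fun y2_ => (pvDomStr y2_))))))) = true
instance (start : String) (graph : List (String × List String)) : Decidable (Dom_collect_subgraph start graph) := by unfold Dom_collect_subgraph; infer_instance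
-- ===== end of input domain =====

-- B replaces A's recursive DFS (nested closure) by an iterative DFS over an explicit
-- stack of (node, remaining-children) frames, same values (alternative decomposition).

-- ===== PORT A =====
-- graph.get(node, [])
def pvChildren (graph : List (String × List String)) (node : String) : List String :=
  PySem.Dict.getD (PySem.Dict.mk graph) node []

-- A's recursive dfs. The Nat argument is a totality guard only: it decreases each time a
-- new node is marked visited, and the initial value chosen in collect_subgraph below
-- exceeds the number of distinct nodes, so the 0-branches are never reached.
mutual
def pvDfsA (graph : List (String × List String)) (f : Nat)
    (s : PySem.Set String × List (String × String)) (node : String) :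
    PySem.Set String × List (String × String) :=
  if PySem.Set.contains s.1 node then s
  else match f with
    | 0 => s
    | f' + 1 => pvDfsChildren graph f' (PySem.Set.add s.1 node, s.2) node (pvChildren graph node)
termination_by (f, 0)
def pvDfsChildren (graph : List (String × List String)) (f : Nat)
    (s : PySem.Set String × List (String × String)) (node : String) (cs : List String) :
    PySem.Set String × List (String × String) :=
  match cs with
  | [] => s
  | c :: cs' => pvDfsChildren graph f (pvDfsA graph f (s.1, s.2 ++ [(node, c)]) c) node cs'
termination_by (f, cs.length + 1)
end

def collect_subgraph (start : String) (graph : List (String × List String)) :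
    List String × (List (String × String)) :=
  pvDfsA graph ((start :: graph.map Prod.fst ++ graph.flatMap Prod.snd).length + 1)
    (PySem.Set.empty, []) start

-- ===== PORT B =====
-- B's while-loop over the frame stack (stack top = list head). The Nat argument is a
-- totality guard only: it decreases exactly when a frame is pushed, and the initial
-- value chosen below exceeds the number of distinct nodes, so the 0-branch is unreachable.
def pvLoopB (graph : List (String × List String)) (f : Nat)
    (s : PySem.Set String × List (String × String)) (stack : List (String × List String)) :
    PySem.Set String × List (String × String) :=
  match stack with
  | [] => s
  | (_, []) :: rest => pvLoopB graph f s rest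
  | (n, c :: cs) :: rest =>
    let s1 := (s.1, s.2 ++ [(n, c)])
    if PySem.Set.contains s.1 c then pvLoopB graph f s1 ((n, cs) :: rest)
    else match f with
      | 0 => s1
      | f' + 1 => pvLoopB graph f' (PySem.Set.add s1.1 c, s1.2) ((c, pvChildren graph c) :: (n, cs) :: rest)
termination_by (f, stack.foldr (fun fr acc => fr.2.length + 1 + acc) 0)

def collect_subgraph_alt (start : String) (graph : List (String × List String)) :
    List String × (List (String × String)) :=
  pvLoopB graph ((start :: graph.map Prod.fst ++ graph.flatMap Prod.snd).length + 1)
    (PySem.Set.ofList [start], []) [(start, pvChildren graph start)]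

def Spec_collect_subgraph (start : String) (graph : List (String × List String)) (out : List String × (List (String × String))) : Prop := out = collect_subgraph_alt start graph
instance (start : String) (graph : List (String × List String)) (out : List String × (List (String × String))) : Decidable (Spec_collect_subgraph start graph out) := by unfold Spec_collect_subgraph; infer_instance

-- ===== CLAIM (what is proved, stated in full; the proofs are below) =====
def Claim_equal_collect_subgraph : Prop := ∀ (start : String) (graph : List (String × List String)), Dom_collect_subgraph start graph → Spec_collect_subgraph start graph (collect_subgraph start graph)

-- ===== LEMMAS AND PROOFS =====

-- All distinct node names that can ever be visited: start, the keys, and all children.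
def pvAll (start : String) (graph : List (String × List String)) : List String :=
  PySem.List.dedup (start :: graph.map Prod.fst ++ graph.flatMap Prod.snd)

-- Number of not-yet-visited node names: the common fuel bound / termination measure.
def pvU (start : String) (graph : List (String × List String)) (v : PySem.Set String) : Nat :=
  ((pvAll start graph).filter (fun n => !(PySem.Set.contains v n))).length

theorem pvMem_children (graph : List (String × List String)) (node c : String)
    (h : c ∈ pvChildren graph node) : c ∈ graph.flatMap Prod.snd := by
  induction graph with
  | nil => simp [pvChildren, PySem.Dict.getD, PySem.Dict.get?] at h
  | cons p rest ih =>
    rw [pvChildren, PySem.Dict.getD_eq_get?_getD, PySem.Dict.get?_mk_cons] at h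
    by_cases hk : p.1 == node
    · simp [hk] at h
      exact List.mem_flatMap.2 ⟨p, by simp, h⟩
    · simp [hk] at h
      rw [pvChildren, PySem.Dict.getD_eq_get?_getD] at ih
      rcases List.mem_flatMap.1 (ih h) with ⟨x, hx, hcx⟩
      exact List.mem_flatMap.2 ⟨x, by simp [hx], hcx⟩

theorem pvChildren_subset_all (start : String) (graph : List (String × List String))
    (node c : String) (h : c ∈ pvChildren graph node) : c ∈ pvAll start graph := by
  have := pvMem_children graph node c h
  simp [pvAll]
  right
  rcases List.mem_flatMap.1 this with ⟨x, hx, hcx⟩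
  exact Or.inr ⟨x.1, x.2, by simpa using hx, hcx⟩

theorem pvStart_mem_all (start : String) (graph : List (String × List String)) :
    start ∈ pvAll start graph := by
  simp [pvAll]

theorem pvFilterLenMono {α : Type} (l : List α) (p q : α → Bool) (h : ∀ a, p a = true → q a = true) :
    (l.filter p).length ≤ (l.filter q).length := by
  induction l with
  | nil => simp
  | cons a l ih =>
    by_cases hp : p a
    · simp [hp, h a hp]; omega
    · simp only [List.filter_cons]
      rw [if_neg (by simp [hp])]
      by_cases hq : q a
      · simp [hq]; omega
      · rw [if_neg (by simp [hq])]; exact ih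

theorem pvFilterRemove {α : Type} [DecidableEq α] (l : List α) (hnd : l.Nodup) (c : α) (hc : c ∈ l)
    (p : α → Bool) (hpc : p c = true) :
    (l.filter (fun n => p n && !(n = c : Bool))).length + 1 = (l.filter p).length := by
  induction l with
  | nil => simp at hc
  | cons a l ih =>
    rcases List.mem_cons.1 hc with rfl | hcl
    · have hnl : c ∉ l := (List.nodup_cons.1 hnd).1
      have heq : l.filter (fun n => p n && !(n = c : Bool)) = l.filter p := by
        apply List.filter_congr
        intro x hx
        have : x ≠ c := fun e => hnl (e ▸ hx)
        simp [this]
      simp [hpc, heq]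
    · have hnd' := (List.nodup_cons.1 hnd).2
      by_cases hp : p a
      · have hac : a ≠ c := fun e => (List.nodup_cons.1 hnd).1 (e ▸ hcl)
        simp [hp, hac]
        exact ih hnd' hcl
      · simp only [List.filter_cons]
        rw [if_neg (by simp [hp]), if_neg (by simp [hp])]
        exact ih hnd' hcl

theorem pvU_le_of_subset (start : String) (graph : List (String × List String))
    (v w : PySem.Set String) (h : ∀ x, x ∈ v → x ∈ w) :
    pvU start graph w ≤ pvU start graph v := by
  apply pvFilterLenMono
  intro a ha
  simp only [Bool.not_eq_true'] at ha ⊢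
  by_contra hcon
  rw [Bool.not_eq_false] at hcon
  have : a ∈ w := h a ((PySem.Set.contains_iff _ _).1 hcon)
  rw [(PySem.Set.contains_iff _ _).2 this] at ha
  exact Bool.noConfusion ha

theorem pvAddContains (v : PySem.Set String) (c n : String) (hc : PySem.Set.contains v c = false) :
    (!(PySem.Set.contains (PySem.Set.add v c) n)) = (!(PySem.Set.contains v n) && !(n = c : Bool)) := by
  simp [PySem.Set.add, PySem.Set.contains] at *
  by_cases h : n = c <;> by_cases h2 : n ∈ v <;> simp_all

theorem pvU_add (start : String) (graph : List (String × List String)) (v : PySem.Set String)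
    (c : String) (hmem : c ∈ pvAll start graph) (hc : PySem.Set.contains v c = false) :
    pvU start graph (PySem.Set.add v c) + 1 = pvU start graph v := by
  unfold pvU
  have heq : ((pvAll start graph).filter (fun n => !(PySem.Set.contains (PySem.Set.add v c) n)))
      = (pvAll start graph).filter (fun n => (!(PySem.Set.contains v n)) && !(n = c : Bool)) := by
    apply List.filter_congr
    intro x _
    exact pvAddContains v c x hc
  rw [heq]
  exact pvFilterRemove _ (PySem.List.nodup_dedup _) c hmem _ (by simp only [hc, Bool.not_false])

theorem pvU_pos (start : String) (graph : List (String × List String)) (v : PySem.Set String)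
    (c : String) (hmem : c ∈ pvAll start graph) (hc : PySem.Set.contains v c = false) :
    1 ≤ pvU start graph v := by
  unfold pvU
  exact List.length_pos_of_mem (List.mem_filter.2 ⟨hmem, by simp only [hc, Bool.not_false]⟩)

mutual
theorem pvMonoA (graph : List (String × List String)) (f : Nat)
    (s : PySem.Set String × List (String × String)) (node x : String) (h : x ∈ s.1) :
    x ∈ (pvDfsA graph f s node).1 := by
  rw [pvDfsA.eq_def]
  split
  · exact h
  · cases f with
    | zero => exact h
    | succ f' =>
      exact pvMonoC graph f' _ node _ x ((PySem.Set.mem_add _ _ _).2 (Or.inl h))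
termination_by (f, 0)
theorem pvMonoC (graph : List (String × List String)) (f : Nat)
    (s : PySem.Set String × List (String × String)) (node : String) (cs : List String)
    (x : String) (h : x ∈ s.1) : x ∈ (pvDfsChildren graph f s node cs).1 := by
  cases cs with
  | nil => rw [pvDfsChildren.eq_def]; exact h
  | cons c cs' =>
    rw [pvDfsChildren.eq_def]
    exact pvMonoC graph f _ node cs' x (pvMonoA graph f (s.1, s.2 ++ [(node, c)]) c x h)
termination_by (f, cs.length + 1)
end

theorem pvUA (start : String) (graph : List (String × List String)) (f : Nat)
    (s : PySem.Set String × List (String × String)) (node : String) :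
    pvU start graph (pvDfsA graph f s node).1 ≤ pvU start graph s.1 := by
  exact pvU_le_of_subset _ _ _ _ (fun x hx => pvMonoA graph f s node x hx)

theorem pvUC (start : String) (graph : List (String × List String)) (f : Nat)
    (s : PySem.Set String × List (String × String)) (node : String) (cs : List String) :
    pvU start graph (pvDfsChildren graph f s node cs).1 ≤ pvU start graph s.1 := by
  exact pvU_le_of_subset _ _ _ _ (fun x hx => pvMonoC graph f s node cs x hx)

mutual
theorem pvFuelA (start : String) (graph : List (String × List String)) (f f' : Nat)
    (s : PySem.Set String × List (String × String)) (node : String)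
    (hf : pvU start graph s.1 ≤ f) (hf' : pvU start graph s.1 ≤ f')
    (hn : node ∈ pvAll start graph) :
    pvDfsA graph f s node = pvDfsA graph f' s node := by
  rw [pvDfsA.eq_def, pvDfsA.eq_def]
  by_cases hcont : PySem.Set.contains s.1 node
  · have hm : node ∈ s.1 := (PySem.Set.contains_iff _ _).1 hcont
    simp [hm]
  · have hcf : PySem.Set.contains s.1 node = false := Bool.not_eq_true _ ▸ Bool.eq_false_iff.2 hcont
    have h1 : 1 ≤ pvU start graph s.1 := pvU_pos start graph s.1 node hn hcf
    simp only [hcf, Bool.false_eq_true, if_false]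
    cases f with
    | zero => omega
    | succ fa =>
      cases f' with
      | zero => omega
      | succ fb =>
        have hU : pvU start graph (PySem.Set.add s.1 node) + 1 = pvU start graph s.1 :=
          pvU_add start graph s.1 node hn hcf
        exact pvFuelC start graph fa fb (PySem.Set.add s.1 node, s.2) node (pvChildren graph node)
          (by simpa using Nat.le_of_lt_succ (by omega)) (by simpa using Nat.le_of_lt_succ (by omega))
          (fun c hcm => pvChildren_subset_all start graph node c hcm)
termination_by (f, 0)
theorem pvFuelC (start : String) (graph : List (String × List String)) (f f' : Nat)
    (s : PySem.Set String × List (String × String)) (node : String) (cs : List String)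
    (hf : pvU start graph s.1 ≤ f) (hf' : pvU start graph s.1 ≤ f')
    (hcs : ∀ c ∈ cs, c ∈ pvAll start graph) :
    pvDfsChildren graph f s node cs = pvDfsChildren graph f' s node cs := by
  cases cs with
  | nil => rw [pvDfsChildren.eq_def, pvDfsChildren.eq_def]
  | cons c cs' =>
    rw [pvDfsChildren.eq_def, pvDfsChildren.eq_def]
    dsimp only
    have hc' : c ∈ pvAll start graph := hcs c (List.mem_cons_self)
    have hA : pvDfsA graph f (s.1, s.2 ++ [(node, c)]) c
        = pvDfsA graph f' (s.1, s.2 ++ [(node, c)]) c :=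
      pvFuelA start graph f f' (s.1, s.2 ++ [(node, c)]) c hf hf' hc'
    rw [hA]
    exact pvFuelC start graph f f' (pvDfsA graph f' (s.1, s.2 ++ [(node, c)]) c) node cs'
      (le_trans (pvUA start graph f' (s.1, s.2 ++ [(node, c)]) c) hf)
      (le_trans (pvUA start graph f' (s.1, s.2 ++ [(node, c)]) c) hf')
      (fun x hx => hcs x (List.mem_cons_of_mem _ hx))
termination_by (f, cs.length + 1)
end

theorem pvFuelB (start : String) (graph : List (String × List String)) (f f' : Nat)
    (s : PySem.Set String × List (String × String)) (stack : List (String × List String))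
    (hf : pvU start graph s.1 ≤ f) (hf' : pvU start graph s.1 ≤ f')
    (hstack : ∀ fr ∈ stack, ∀ c ∈ fr.2, c ∈ pvAll start graph) :
    pvLoopB graph f s stack = pvLoopB graph f' s stack :=
  match stack, hstack with
  | [], _ => by
    rw [pvLoopB.eq_def, pvLoopB.eq_def]
  | (n, []) :: rest, hstack => by
    rw [pvLoopB.eq_def, pvLoopB.eq_def]
    dsimp only
    exact pvFuelB start graph f f' s rest hf hf'
        (fun fr h => hstack fr (List.mem_cons_of_mem _ h))
  | (n, c :: cs') :: rest, hstack => by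
    rw [pvLoopB.eq_def, pvLoopB.eq_def]
    dsimp only
    by_cases hm : PySem.Set.contains s.1 c = true
    · rw [if_pos hm, if_pos hm]
      exact pvFuelB start graph f f' (s.1, s.2 ++ [(n, c)]) ((n, cs') :: rest) hf hf'
        (fun fr h => by
          rcases List.mem_cons.1 h with rfl | h'
          · exact fun x hx => hstack (n, c :: cs') List.mem_cons_self x (List.mem_cons_of_mem _ hx)
          · exact hstack fr (List.mem_cons_of_mem _ h'))
    · rw [if_neg hm, if_neg hm]
      have hcf : PySem.Set.contains s.1 c = false := Bool.not_eq_true _ ▸ Bool.eq_false_iff.2 hm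
      have hcall : c ∈ pvAll start graph :=
        hstack (n, c :: cs') List.mem_cons_self c List.mem_cons_self
      have h1 : 1 ≤ pvU start graph s.1 := pvU_pos start graph s.1 c hcall hcf
      have hU : pvU start graph (PySem.Set.add s.1 c) + 1 = pvU start graph s.1 :=
        pvU_add start graph s.1 c hcall hcf
      cases f with
      | zero => omega
      | succ fa =>
        cases f' with
        | zero => omega
        | succ fb =>
          exact pvFuelB start graph fa fb (PySem.Set.add s.1 c, s.2 ++ [(n, c)])
            ((c, pvChildren graph c) :: (n, cs') :: rest)
            (by show pvU start graph (PySem.Set.add s.1 c) ≤ fa; omega)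
            (by show pvU start graph (PySem.Set.add s.1 c) ≤ fb; omega)
            (fun fr h => by
              rcases List.mem_cons.1 h with rfl | h'
              · exact fun x hx => pvChildren_subset_all start graph c x hx
              · rcases List.mem_cons.1 h' with rfl | h''
                · exact fun x hx => hstack (n, c :: cs') List.mem_cons_self x (List.mem_cons_of_mem _ hx)
                · exact hstack fr (List.mem_cons_of_mem _ h''))
termination_by (f, stack.foldr (fun fr acc => fr.2.length + 1 + acc) 0)


theorem pvMain (start : String) (graph : List (String × List String))
    (s : PySem.Set String × List (String × String)) (node : String) (cs : List String)
    (rest : List (String × List String))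
    (hcs : ∀ c ∈ cs, c ∈ pvAll start graph) :
    pvLoopB graph (pvU start graph s.1) s ((node, cs) :: rest)
      = pvLoopB graph (pvU start graph (pvDfsChildren graph (pvU start graph s.1) s node cs).1)
          (pvDfsChildren graph (pvU start graph s.1) s node cs) rest :=
  match cs, hcs with
  | [], _ => by
    have hR : pvDfsChildren graph (pvU start graph s.1) s node [] = s := by
      rw [pvDfsChildren.eq_def]
    rw [hR, pvLoopB.eq_def]
  | c :: cs', hcs => by
    have hc' : c ∈ pvAll start graph := hcs c List.mem_cons_self
    have hcsA : ∀ x ∈ cs', x ∈ pvAll start graph := fun x hx => hcs x (List.mem_cons_of_mem _ hx)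
    by_cases hm : PySem.Set.contains s.1 c = true
    · have hmem : c ∈ s.1 := (PySem.Set.contains_iff _ _).1 hm
      have hA1 : pvDfsA graph (pvU start graph s.1) (s.1, s.2 ++ [(node, c)]) c
          = (s.1, s.2 ++ [(node, c)]) := by
        rw [pvDfsA.eq_def]
        simp [hmem]
      have hR : pvDfsChildren graph (pvU start graph s.1) s node (c :: cs')
          = pvDfsChildren graph (pvU start graph s.1) (s.1, s.2 ++ [(node, c)]) node cs' := by
        rw [pvDfsChildren.eq_def]
        dsimp only
        rw [hA1]
      have hL : pvLoopB graph (pvU start graph s.1) s ((node, c :: cs') :: rest)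
          = pvLoopB graph (pvU start graph s.1) (s.1, s.2 ++ [(node, c)]) ((node, cs') :: rest) := by
        rw [pvLoopB.eq_def]
        dsimp only
        rw [if_pos hm]
      rw [hR, hL]
      exact pvMain start graph (s.1, s.2 ++ [(node, c)]) node cs' rest hcsA
    · have hcf : PySem.Set.contains s.1 c = false := Bool.not_eq_true _ ▸ Bool.eq_false_iff.2 hm
      have hnm : ¬ c ∈ s.1 := fun hx => hm ((PySem.Set.contains_iff _ _).2 hx)
      have h1 : 1 ≤ pvU start graph s.1 := pvU_pos start graph s.1 c hc' hcf
      have hUadd : pvU start graph (PySem.Set.add s.1 c) + 1 = pvU start graph s.1 :=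
        pvU_add start graph s.1 c hc' hcf
      obtain ⟨u, hu⟩ : ∃ u, pvU start graph s.1 = u + 1 := ⟨pvU start graph s.1 - 1, by omega⟩
      have husm : pvU start graph (PySem.Set.add s.1 c, s.2 ++ [(node, c)]).1 = u := by
        show pvU start graph (PySem.Set.add s.1 c) = u
        omega
      have hstep : pvLoopB graph (pvU start graph s.1) s ((node, c :: cs') :: rest)
          = pvLoopB graph (pvU start graph (PySem.Set.add s.1 c, s.2 ++ [(node, c)]).1)
              (PySem.Set.add s.1 c, s.2 ++ [(node, c)])
              ((c, pvChildren graph c) :: (node, cs') :: rest) := by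
        rw [pvLoopB.eq_def, hu]
        dsimp only
        rw [if_neg hm, husm]
      have hIH1 := pvMain start graph (PySem.Set.add s.1 c, s.2 ++ [(node, c)]) c
        (pvChildren graph c) ((node, cs') :: rest)
        (fun x hx => pvChildren_subset_all start graph c x hx)
      have hUR1 : pvU start graph (pvDfsChildren graph
            (pvU start graph (PySem.Set.add s.1 c, s.2 ++ [(node, c)]).1)
            (PySem.Set.add s.1 c, s.2 ++ [(node, c)]) c (pvChildren graph c)).1 ≤ u :=
        husm ▸ pvUC start graph _ (PySem.Set.add s.1 c, s.2 ++ [(node, c)]) c (pvChildren graph c)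
      have hIH2 := pvMain start graph
        (pvDfsChildren graph (pvU start graph (PySem.Set.add s.1 c, s.2 ++ [(node, c)]).1)
          (PySem.Set.add s.1 c, s.2 ++ [(node, c)]) c (pvChildren graph c)) node cs' rest hcsA
      have hA1 : pvDfsA graph (pvU start graph s.1) (s.1, s.2 ++ [(node, c)]) c
          = pvDfsChildren graph (pvU start graph (PySem.Set.add s.1 c, s.2 ++ [(node, c)]).1)
              (PySem.Set.add s.1 c, s.2 ++ [(node, c)]) c (pvChildren graph c) := by
        rw [pvDfsA.eq_def, hu]
        dsimp only
        rw [if_neg hm, ← husm]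
      have hR : pvDfsChildren graph (pvU start graph s.1) s node (c :: cs')
          = pvDfsChildren graph (pvU start graph s.1)
              (pvDfsChildren graph (pvU start graph (PySem.Set.add s.1 c, s.2 ++ [(node, c)]).1)
                (PySem.Set.add s.1 c, s.2 ++ [(node, c)]) c (pvChildren graph c)) node cs' := by
        rw [pvDfsChildren.eq_def]
        dsimp only
        rw [hA1]
      have hfuel : pvDfsChildren graph (pvU start graph s.1)
            (pvDfsChildren graph (pvU start graph (PySem.Set.add s.1 c, s.2 ++ [(node, c)]).1)
              (PySem.Set.add s.1 c, s.2 ++ [(node, c)]) c (pvChildren graph c)) node cs'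
          = pvDfsChildren graph (pvU start graph
              (pvDfsChildren graph (pvU start graph (PySem.Set.add s.1 c, s.2 ++ [(node, c)]).1)
                (PySem.Set.add s.1 c, s.2 ++ [(node, c)]) c (pvChildren graph c)).1)
              (pvDfsChildren graph (pvU start graph (PySem.Set.add s.1 c, s.2 ++ [(node, c)]).1)
                (PySem.Set.add s.1 c, s.2 ++ [(node, c)]) c (pvChildren graph c)) node cs' :=
        pvFuelC start graph _ _ _ node cs' (by omega) (le_refl _) hcsA
      rw [hR, hfuel, hstep, hIH1, hIH2]
termination_by (pvU start graph s.1, cs.length)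
decreasing_by
  · exact Prod.Lex.right _ (by simp)
  · exact Prod.Lex.left _ _ (by omega)
  · refine Prod.Lex.left _ _ ?_
    have h2 := pvUC start graph (pvU start graph (PySem.Set.add s.1 c))
      (PySem.Set.add s.1 c, s.2 ++ [(node, c)]) c (pvChildren graph c)
    dsimp only at h2 husm ⊢
    omega

theorem pvFoldlAddLen (xs : List String) : ∀ acc : PySem.Set String,
    (xs.foldl PySem.Set.add acc).length ≤ acc.length + xs.length := by
  induction xs with
  | nil => intro acc; simp
  | cons x xs ih =>
    intro acc
    have h1 : (PySem.Set.add acc x).length ≤ acc.length + 1 := by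
      unfold PySem.Set.add
      split <;> simp
    have h2 := ih (PySem.Set.add acc x)
    simp only [List.foldl_cons, List.length_cons]
    omega

theorem pvLenAll (start : String) (graph : List (String × List String)) :
    (pvAll start graph).length
      ≤ (start :: graph.map Prod.fst ++ graph.flatMap Prod.snd).length := by
  unfold pvAll
  rw [PySem.List.dedup_eq_ofList, PySem.Set.ofList_eq_foldl]
  simpa using pvFoldlAddLen (start :: graph.map Prod.fst ++ graph.flatMap Prod.snd) []

theorem pvTop (start : String) (graph : List (String × List String)) :
    collect_subgraph start graph = collect_subgraph_alt start graph := by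
  unfold collect_subgraph collect_subgraph_alt
  have hstart : start ∈ pvAll start graph := pvStart_mem_all start graph
  have hlen := pvLenAll start graph
  have hne : PySem.Set.contains PySem.Set.empty start = false := rfl
  have hU0 : pvU start graph (PySem.Set.add PySem.Set.empty start) + 1
      = pvU start graph PySem.Set.empty := pvU_add start graph PySem.Set.empty start hstart hne
  have hUe : pvU start graph PySem.Set.empty = (pvAll start graph).length := by
    unfold pvU
    congr 1
    apply List.filter_eq_self.2
    intro a _
    rfl
  have hcs0 : ∀ x ∈ pvChildren graph start, x ∈ pvAll start graph :=
    fun x hx => pvChildren_subset_all start graph start x hx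
  have hA : pvDfsA graph ((start :: graph.map Prod.fst ++ graph.flatMap Prod.snd).length + 1)
        (PySem.Set.empty, []) start
      = pvDfsChildren graph ((start :: graph.map Prod.fst ++ graph.flatMap Prod.snd).length)
        (PySem.Set.add PySem.Set.empty start, []) start (pvChildren graph start) := by
    rw [pvDfsA.eq_def]
    rw [if_neg (by simp [PySem.Set.empty])]
  have hfA : pvDfsChildren graph ((start :: graph.map Prod.fst ++ graph.flatMap Prod.snd).length)
        (PySem.Set.add PySem.Set.empty start, []) start (pvChildren graph start)
      = pvDfsChildren graph (pvU start graph (PySem.Set.add PySem.Set.empty start, ([] : List (String × String))).1)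
        (PySem.Set.add PySem.Set.empty start, []) start (pvChildren graph start) :=
    pvFuelC start graph _ _ _ start (pvChildren graph start)
      (by simp only []; omega) (le_refl _) hcs0
  have hB : pvLoopB graph ((start :: graph.map Prod.fst ++ graph.flatMap Prod.snd).length + 1)
        (PySem.Set.ofList [start], []) [(start, pvChildren graph start)]
      = pvLoopB graph (pvU start graph (PySem.Set.add PySem.Set.empty start, ([] : List (String × String))).1)
        (PySem.Set.add PySem.Set.empty start, []) [(start, pvChildren graph start)] :=
    pvFuelB start graph _ _ (PySem.Set.add PySem.Set.empty start, []) [(start, pvChildren graph start)]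
      (by simp only []; omega) (le_refl _)
      (fun fr h => by
        rcases List.mem_cons.1 h with rfl | h'
        · exact fun x hx => hcs0 x hx
        · simp at h')
  have hmain := pvMain start graph (PySem.Set.add PySem.Set.empty start, []) start
    (pvChildren graph start) [] hcs0
  have hnilB : ∀ (f : Nat) (st : PySem.Set String × List (String × String)),
      pvLoopB graph f st [] = st := fun f st => by rw [pvLoopB.eq_def]
  rw [hA, hfA, hB, hmain, hnilB]

-- ===== VERDICT (by name: the statement is the Claim_ definition above) =====
theorem collect_subgraph_spec : Claim_equal_collect_subgraph := by
  intro start graph _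
  exact pvTop start graph
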